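-- pv_equiv track=rewrite | github.com/codernayeem/calculator | src/main/python/tools.py | fix_multiplication
-- ===== SOURCE A (Python) =====
-- def fix_multiplication(exp, before, after):
--     old_char = None
--     new_exp = ''
--     for a_char in exp:
--         if old_char is not None:
--             if old_char in before and a_char in after:
--                 new_exp += '*' + a_char
--             else:
--                 new_exp += a_char
--             old_char = a_char
--         else:
--             old_char = a_char
--             new_exp += a_char
--     return new_exp
-- ===== SOURCE B (Python) =====
-- def fix_multiplication(exp, before, after):
--     # Two-stage approach: first collect every index where a '*' must be
--     # inserted, then cut exp into the segments between those indices and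
--     # glue the segments back together with '*'.
--     cuts = [i for i in range(1, len(exp))
--             if exp[i - 1] in before and exp[i] in after]
--     bounds = [0] + cuts
--     parts = [exp[a:b] for a, b in zip(bounds, cuts + [len(exp)])]
--     return '*'.join(parts)
-- ===== Notes on version B (the rewrite author's own statement) =====
-- stated objective: alternative
-- what changed: Replaces the stateful single-pass accumulation by two stages: collect all insertion indices first, then slice the string into segments at those indices and join the segments with '*'.
import Mathlib
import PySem

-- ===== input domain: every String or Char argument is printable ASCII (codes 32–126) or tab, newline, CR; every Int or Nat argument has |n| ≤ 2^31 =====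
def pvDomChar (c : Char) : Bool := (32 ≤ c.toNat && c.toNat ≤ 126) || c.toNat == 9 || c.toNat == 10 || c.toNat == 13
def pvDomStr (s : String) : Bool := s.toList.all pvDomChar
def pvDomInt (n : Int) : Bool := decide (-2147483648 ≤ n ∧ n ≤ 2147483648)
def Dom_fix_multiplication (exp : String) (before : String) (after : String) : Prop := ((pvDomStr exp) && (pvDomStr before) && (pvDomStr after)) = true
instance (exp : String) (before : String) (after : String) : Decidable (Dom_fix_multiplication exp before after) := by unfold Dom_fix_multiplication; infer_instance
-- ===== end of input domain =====

-- B replaces A's stateful single pass by two stages: collect insertion indices, then splice '*' back-to-front (objective: alternative; not faster).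


-- ===== PORT A =====
-- Port of A: fold over the characters with state (old_char, new_exp).
def fix_multiplication (exp : String) (before : String) (after : String) : String :=
  let r := exp.toList.foldl (fun (st : Option Char × List Char) (a_char : Char) =>
    match st.1 with
    | some old_char =>
        if old_char ∈ before.toList ∧ a_char ∈ after.toList then
          (some a_char, st.2 ++ ['*', a_char])
        else
          (some a_char, st.2 ++ [a_char])
    | none => (some a_char, st.2 ++ [a_char])) (none, [])
  String.mk r.2

-- ===== PORT B =====
-- Port of B: collect the insertion indices (range(1, len) filter), then cut
-- the string into segments at those indices (exp[a:b] with 0 <= a <= b <= len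
-- is exactly (l.drop a).take (b - a)) and join the segments with '*'.
def fix_multiplication_alt (exp : String) (before : String) (after : String) : String :=
  let l := exp.toList
  let cuts := (List.range' 1 (l.length - 1)).filter
    (fun i => decide (l.getD (i - 1) ' ' ∈ before.toList ∧ l.getD i ' ' ∈ after.toList))
  let bounds := 0 :: cuts
  let parts := (bounds.zip (cuts ++ [l.length])).map (fun p => (l.drop p.1).take (p.2 - p.1))
  String.mk (List.intercalate ['*'] parts)

-- ===== PRECONDITION & SPEC =====
def Spec_fix_multiplication (exp : String) (before : String) (after : String) (out : String) : Prop := out = fix_multiplication_alt exp before after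
instance (exp : String) (before : String) (after : String) (out : String) : Decidable (Spec_fix_multiplication exp before after out) := by unfold Spec_fix_multiplication; infer_instance

-- ===== CLAIM (what is proved, stated in full; the proofs are below) =====
def Claim_equal_fix_multiplication : Prop := ∀ (exp : String) (before : String) (after : String), Dom_fix_multiplication exp before after → Spec_fix_multiplication exp before after (fix_multiplication exp before after)

-- ===== LEMMAS AND PROOFS =====

-- Canonical pairwise expansion: pexp B A prev t emits each char of t, with a
-- preceding '*' when the adjacent pair matches.
def pexp (B A : List Char) : Char → List Char → List Char
  | _, [] => []
  | prev, c :: t => (if prev ∈ B ∧ c ∈ A then ['*', c] else [c]) ++ pexp B A c t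

-- mark P s k: emit s, inserting '*' before the element of absolute index j
-- (counting from k) whenever P j.
def mark (P : Nat → Bool) : List Char → Nat → List Char
  | [], _ => []
  | c :: t, k => (if P k then ['*', c] else [c]) ++ mark P t (k + 1)

theorem mark_congr (P Q : Nat → Bool) : ∀ (s : List Char) (k : Nat),
    (∀ j, k ≤ j → P j = Q j) → mark P s k = mark Q s k := by
  intro s
  induction s with
  | nil => intro k _; rfl
  | cons c t ih =>
      intro k h
      simp only [mark, h k le_rfl, ih (k+1) (fun j hj => h j (by omega))]

theorem mark_false (P : Nat → Bool) : ∀ (s : List Char) (k : Nat),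
    (∀ j, k ≤ j → P j = false) → mark P s k = s := by
  intro s
  induction s with
  | nil => intro k _; rfl
  | cons c t ih =>
      intro k h
      simp [mark, h k le_rfl, ih (k+1) (fun j hj => h j (by omega))]

theorem mark_split (P : Nat → Bool) : ∀ (m : Nat) (s : List Char) (k : Nat),
    (∀ j, k ≤ j → j < k + m → P j = false) →
    mark P s k = s.take m ++ mark P (s.drop m) (k + m) := by
  intro m
  induction m with
  | zero => intro s k _; simp
  | succ m ih =>
      intro s k h
      cases s with
      | nil => simp [mark]
      | cons c t =>
          have h0 : P k = false := h k le_rfl (by omega)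
          have ht := ih t (k+1) (fun j hj hj' => h j (by omega) (by omega))
          have harith : k + 1 + m = k + (m + 1) := by omega
          rw [harith] at ht
          simp [mark, h0, ht]

-- intercalate on a cons with nonempty tail.
theorem intercalate_cons_ne (x : List Char) (xs : List (List Char)) (h : xs ≠ []) :
    List.intercalate ['*'] (x :: xs) = x ++ '*' :: List.intercalate ['*'] xs := by
  cases xs with
  | nil => exact absurd rfl h
  | cons y ys => simp [List.intercalate, List.intersperse]

-- Joining the segments of l between ascending in-range cut indices with '*' = mark.
theorem join_mark (l : List Char) : ∀ (cuts : List Nat) (a : Nat),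
    List.Pairwise (· < ·) (a :: cuts) → (∀ i ∈ cuts, i < l.length) → a ≤ l.length →
    List.intercalate ['*'] (((a :: cuts).zip (cuts ++ [l.length])).map
        (fun p => (l.drop p.1).take (p.2 - p.1)))
      = mark (fun j => decide (j ∈ cuts)) (l.drop a) a := by
  intro cuts
  induction cuts with
  | nil =>
      intro a _ _ ha
      rw [mark_false _ _ _ (by simp)]
      simp [List.intercalate, List.take_of_length_le, List.length_drop]
  | cons i rest ih =>
      intro a hp hb ha
      have hai : a < i := (List.pairwise_cons.mp hp).1 i (List.mem_cons_self ..)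
      have hp' : List.Pairwise (· < ·) (i :: rest) := (List.pairwise_cons.mp hp).2
      have hlt : ∀ j ∈ rest, i < j := fun j hj => (List.pairwise_cons.mp hp').1 j hj
      have hi : i < l.length := hb i (List.mem_cons_self ..)
      have hrec := ih i hp' (fun j hj => hb j (List.mem_cons_of_mem _ hj)) (le_of_lt hi)
      simp only [List.cons_append, List.zip_cons_cons, List.map_cons]
      have hne : ((( i :: rest).zip (rest ++ [l.length])).map
          (fun p => (l.drop p.1).take (p.2 - p.1))) ≠ [] := by
        apply List.ne_nil_of_length_pos
        simp [List.length_zip]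
      rw [intercalate_cons_ne _ _ hne, hrec]
      have hsplit : mark (fun j => decide (j ∈ i :: rest)) (l.drop a) a
          = (l.drop a).take (i - a)
              ++ mark (fun j => decide (j ∈ i :: rest)) ((l.drop a).drop (i - a)) (a + (i - a)) := by
        refine mark_split _ (i - a) (l.drop a) a (fun j hj hj' => ?_)
        simp only [decide_eq_false_iff_not, List.mem_cons, not_or]
        exact ⟨by omega, fun hmem => absurd (hlt j hmem) (by omega)⟩
      have hia : a + (i - a) = i := by omega
      rw [hsplit, List.drop_drop]
      simp only [hia]
      have hdrop : l.drop i = l[i] :: l.drop (i+1) := List.drop_eq_getElem_cons hi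
      rw [hdrop]
      have hRi : decide (i ∈ rest) = false := by
        simp only [decide_eq_false_iff_not]; intro hmem; exact absurd (hlt i hmem) (by omega)
      have hFi : decide (i ∈ i :: rest) = true := by simp
      simp only [mark, hRi, hFi, if_true, if_false, Bool.false_eq_true]
      simp only [List.cons_append, List.nil_append]
      have hcong : mark (fun j => decide (j ∈ rest)) (l.drop (i+1)) (i+1)
          = mark (fun j => decide (j ∈ i :: rest)) (l.drop (i+1)) (i+1) := by
        refine mark_congr _ _ _ _ (fun j hj => ?_)
        simp only [List.mem_cons, decide_eq_decide]
        constructor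
        · intro hmem; exact Or.inr hmem
        · intro hmem; exact hmem.resolve_left (by omega)
      rw [hcong]

-- mark with a predicate matching the adjacent-pair condition = pexp.
theorem mark_pexp (B A : List Char) : ∀ (t : List Char) (prev : Char) (k : Nat) (P : Nat → Bool),
    (∀ j, j < t.length → P (k + j) = decide ((prev :: t).getD j ' ' ∈ B ∧ t.getD j ' ' ∈ A)) →
    mark P t k = pexp B A prev t := by
  intro t
  induction t with
  | nil => intro prev k P _; rfl
  | cons c t ih =>
      intro prev k P h
      have h0 := h 0 (by simp)
      simp only [Nat.add_zero, List.getD_cons_zero] at h0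
      have hrec := ih c (k+1) P (fun j hj => by
        have := h (j+1) (by simpa using Nat.succ_lt_succ hj)
        simpa [Nat.add_assoc, Nat.add_comm 1 j] using this)
      simp only [mark, pexp, h0, hrec]
      by_cases hc : prev ∈ B ∧ c ∈ A
      · simp [hc]
      · simp [hc]

-- A's loop from state (some prev, acc) appends the pairwise expansion of the rest.
theorem foldA_pexp (before after : String) :
    ∀ (rest : List Char) (prev : Char) (acc : List Char),
      (rest.foldl (fun (st : Option Char × List Char) (a_char : Char) =>
        match st.1 with
        | some old_char =>
            if old_char ∈ before.toList ∧ a_char ∈ after.toList then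
              (some a_char, st.2 ++ ['*', a_char])
            else
              (some a_char, st.2 ++ [a_char])
        | none => (some a_char, st.2 ++ [a_char])) (some prev, acc)).2
      = acc ++ pexp before.toList after.toList prev rest := by
  intro rest
  induction rest with
  | nil => intro prev acc; simp [pexp]
  | cons c t ih =>
      intro prev acc
      by_cases h : prev ∈ before.toList ∧ c ∈ after.toList
      · simp [List.foldl_cons, h, ih, pexp, List.append_assoc]
      · simp [List.foldl_cons, h, ih, pexp, List.append_assoc]

-- B = head :: pexp on nonempty input.
theorem altB_pexp (before after : String) (l : List Char) (c : Char) (t : List Char)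
    (hl : l = c :: t) :
    List.intercalate ['*'] (((0 :: (List.range' 1 (l.length - 1)).filter
        (fun i => decide (l.getD (i - 1) ' ' ∈ before.toList ∧ l.getD i ' ' ∈ after.toList))).zip
          (((List.range' 1 (l.length - 1)).filter
        (fun i => decide (l.getD (i - 1) ' ' ∈ before.toList ∧ l.getD i ' ' ∈ after.toList))) ++ [l.length])).map
        (fun p => (l.drop p.1).take (p.2 - p.1)))
      = c :: pexp before.toList after.toList c t := by
  subst hl
  set g : Nat → Bool :=
    (fun i => decide ((c :: t).getD (i - 1) ' ' ∈ before.toList ∧ (c :: t).getD i ' ' ∈ after.toList)) with hg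
  set cuts := (List.range' 1 ((c :: t).length - 1)).filter g with hcuts
  have hmem : ∀ i, i ∈ cuts → 1 ≤ i ∧ i < (c :: t).length ∧ g i = true := by
    intro i hi
    rw [hcuts, List.mem_filter] at hi
    have hr := List.mem_range'_1.mp hi.1
    exact ⟨hr.1, by simp at hr ⊢; omega, hi.2⟩
  have hpair : List.Pairwise (· < ·) cuts := (List.pairwise_lt_range' ..).filter _
  have hbnd : ∀ i ∈ cuts, i < (c :: t).length := fun i hi => (hmem i hi).2.1
  have hpair0 : List.Pairwise (· < ·) (0 :: cuts) :=
    List.pairwise_cons.mpr ⟨fun j hj => by have := (hmem j hj).1; omega, hpair⟩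
  rw [join_mark (c :: t) cuts 0 hpair0 hbnd (by omega), List.drop_zero]
  have h0 : decide ((0 : Nat) ∈ cuts) = false := by
    simp only [decide_eq_false_iff_not]
    intro h; exact absurd ((hmem 0 h).1) (by omega)
  simp only [mark, h0, Bool.false_eq_true, if_false, List.cons_append, List.nil_append]
  refine congrArg _ ?_
  refine mark_pexp _ _ t c 1 _ (fun j hj => ?_)
  simp only [decide_eq_decide]
  constructor
  · intro hmem'
    have := (hmem _ hmem').2.2
    simp only [hg, decide_eq_true_eq] at this
    have e1 : (1 + j) - 1 = j := by omega
    rw [e1] at this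
    constructor
    · simpa [List.getD_cons_succ] using this.1
    · have : (c :: t).getD (1 + j) ' ' ∈ after.toList := this.2
      simpa [Nat.add_comm 1 j, List.getD_cons_succ] using this
  · intro hcond
    rw [hcuts, List.mem_filter]
    constructor
    · refine List.mem_range'_1.mpr ⟨by omega, by simp; omega⟩
    · simp only [hg, decide_eq_true_eq]
      have e1 : (1 + j) - 1 = j := by omega
      rw [e1]
      refine ⟨by simpa [List.getD_cons_succ] using hcond.1, ?_⟩
      have : (c :: t).getD (j + 1) ' ' ∈ after.toList := by
        simpa [List.getD_cons_succ] using hcond.2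
      simpa [Nat.add_comm 1 j] using this

-- ===== VERDICT (by name: the statement is the Claim_ definition above) =====

theorem fix_multiplication_spec : Claim_equal_fix_multiplication := by
  intro exp before after _
  unfold Spec_fix_multiplication fix_multiplication fix_multiplication_alt
  cases h : exp.toList with
  | nil => rfl
  | cons c t =>
      dsimp only
      rw [altB_pexp before after (c :: t) c t rfl]
      simp [List.foldl_cons, foldA_pexp]
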